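-- pv_equiv track=rewrite | github.com/ziomson-pl/PAINT_Dulikowska_Kowalski_Wroblewski_Scrabble | backend/app/services/game_service.py | _get_horizontal_word
-- ===== SOURCE A (Python) =====
-- from typing import List, Dict, Optional, Tuple
--
-- def _get_horizontal_word(board: List[List], row: int, col: int) -> str:
--     """Get horizontal word at position"""
--     min_col = col
--     max_col = col
--
--     while min_col > 0 and board[row][min_col - 1] is not None:
--         min_col -= 1
--     while max_col < 14 and board[row][max_col + 1] is not None:
--         max_col += 1
--
--     word = ""
--     for c in range(min_col, max_col + 1):
--         if board[row][c] is not None: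
--             word += board[row][c]['letter']
--
--     return word
-- ===== SOURCE B (Python) =====
-- def _get_horizontal_word(board, row, col):
--     """Get horizontal word at position"""
--     r = board[row]
--
--     def run(idxs):
--         out = []
--         for i in idxs:
--             if r[i] is None:
--                 break
--             out.append(r[i]['letter'])
--         return out
--
--     left = run(range(col - 1, -1, -1))
--     right = run(range(col + 1, 15))
--     mid = [] if r[col] is None else [r[col]['letter']]
--     return "".join(left[::-1] + mid + right)
-- ===== Notes on version B (the rewrite author's own statement) =====
-- stated objective: simpler
-- what changed: A finds min_col/max_col with two boundary while-loops and then rebuilds the word in a third pass over range(min_col, max_col+1) with a redundant None check; B drops the boundary variables and directly extracts the left and right letter runs (one take-while pass per side) and joins them around the centre cell.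
import Mathlib
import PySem

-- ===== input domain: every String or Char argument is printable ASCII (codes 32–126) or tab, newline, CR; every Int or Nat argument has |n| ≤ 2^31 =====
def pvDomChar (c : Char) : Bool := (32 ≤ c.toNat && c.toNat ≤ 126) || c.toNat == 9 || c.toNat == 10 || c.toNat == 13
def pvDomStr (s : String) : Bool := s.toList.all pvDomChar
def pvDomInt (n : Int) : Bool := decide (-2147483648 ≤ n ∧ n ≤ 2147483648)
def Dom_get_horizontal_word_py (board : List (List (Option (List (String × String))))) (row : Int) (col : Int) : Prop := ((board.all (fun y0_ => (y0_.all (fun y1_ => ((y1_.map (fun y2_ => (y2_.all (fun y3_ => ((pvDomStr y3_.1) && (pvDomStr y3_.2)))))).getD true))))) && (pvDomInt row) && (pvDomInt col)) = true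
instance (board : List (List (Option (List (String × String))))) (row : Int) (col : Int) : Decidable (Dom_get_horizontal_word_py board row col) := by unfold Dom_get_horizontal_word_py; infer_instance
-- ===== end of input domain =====

-- B replaces A's two boundary scans plus a separate rebuild pass by directly extracting the
-- left and right letter runs (one take-while pass per side) joined around the centre cell;
-- objective: simpler (same cost).

-- shared tiny helper: Python's cell['letter'] (first matching key; KeyError → "" here, excluded by Pre_)
def pvLetter (cell : List (String × String)) : String :=
  match cell.find? (fun kv => kv.1 == "letter") with
  | some kv => kv.2
  | none => ""

-- shared tiny helper: both Pythons' `r = board[row]` (negative row wraps; IndexError → [] here, excluded by Pre_)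
def pvRowOf (board : List (List (Option (List (String × String))))) (row : Int) : List (Option (List (String × String))) :=
  (PySem.List.pyGet? board row).getD []

-- ===== PORT A =====
-- Python's `board[row][i] is not None`; out-of-range (IndexError, excluded by Pre_) counts as stop
def pvFilled (r : List (Option (List (String × String)))) (i : Int) : Bool :=
  match PySem.List.pyGet? r i with
  | some (some _) => true
  | _ => false

-- `while min_col > 0 and board[row][min_col - 1] is not None: min_col -= 1`
def pvScanLeft (r : List (Option (List (String × String)))) (m : Int) : Int :=
  if h : 0 < m ∧ pvFilled r (m - 1) = true then pvScanLeft r (m - 1) else m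
termination_by m.toNat
decreasing_by omega

-- `while max_col < 14 and board[row][max_col + 1] is not None: max_col += 1`
def pvScanRight (r : List (Option (List (String × String)))) (m : Int) : Int :=
  if h : m < 14 ∧ pvFilled r (m + 1) = true then pvScanRight r (m + 1) else m
termination_by (14 - m).toNat
decreasing_by omega

def get_horizontal_word_py (board : List (List (Option (List (String × String))))) (row : Int) (col : Int) : String :=
  let r := pvRowOf board row
  let minCol := pvScanLeft r col
  let maxCol := pvScanRight r col
  (PySem.List.pyRange minCol (maxCol + 1) 1).foldl (fun word c =>
    match PySem.List.pyGet? r c with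
    | some (some cell) => word ++ pvLetter cell
    | _ => word) ""

-- ===== PORT B =====
-- Source B's `run(idxs)`: collect letters until a None cell (break); out-of-range (IndexError,
--   excluded by Pre_) also stops
def pvRun (r : List (Option (List (String × String)))) : List Int → List String
  | [] => []
  | i :: rest =>
    match PySem.List.pyGet? r i with
    | some (some cell) => pvLetter cell :: pvRun r rest
    | _ => []

def get_horizontal_word_py_alt (board : List (List (Option (List (String × String))))) (row : Int) (col : Int) : String :=
  let r := pvRowOf board row
  let left := pvRun r (PySem.List.pyRange (col - 1) (-1) (-1))
  let right := pvRun r (PySem.List.pyRange (col + 1) 15 1)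
  let mid : List String :=
    match PySem.List.pyGet? r col with
    | some (some cell) => [pvLetter cell]
    | _ => []
  PySem.Str.join "" (left.reverse ++ mid ++ right)

-- ===== PRECONDITION & SPEC =====
-- pvLetterOk cell: the cell, if present and non-None, has a 'letter' key
def pvLetterOk : Option (List (String × String)) → Bool
  | none => true
  | some cell => (cell.find? (fun kv => kv.1 == "letter")).isSome

-- Pre_ admits exactly the inputs on which Python A returns normally: row and col legal Python
-- indices (negative = wraparound), the non-None run right of col stops before running off a row
-- shorter than 15 (else IndexError), and every cell whose letter the build pass reads — the centre
-- and every cell joined to col by a contiguous non-None chain — has a 'letter' key (else KeyError).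
def Pre_get_horizontal_word_py (board : List (List (Option (List (String × String))))) (row : Int) (col : Int) : Prop :=
  -(board.length : Int) ≤ row ∧ row < (board.length : Int) ∧
  -((pvRowOf board row).length : Int) ≤ col ∧ col < ((pvRowOf board row).length : Int) ∧
  (15 ≤ (pvRowOf board row).length ∨ 14 ≤ col ∨
    ∃ j ∈ PySem.List.pyRange (col + 1) ((pvRowOf board row).length : Int) 1,
      PySem.List.pyGet? (pvRowOf board row) j = some none) ∧
  pvLetterOk ((PySem.List.pyGet? (pvRowOf board row) col).getD none) = true ∧
  (∀ c ∈ PySem.List.pyRange 0 col 1,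
    (∀ j ∈ PySem.List.pyRange c col 1,
      ((PySem.List.pyGet? (pvRowOf board row) j).getD none).isSome = true) →
    pvLetterOk ((PySem.List.pyGet? (pvRowOf board row) c).getD none) = true) ∧
  (∀ c ∈ PySem.List.pyRange (col + 1) 15 1,
    (∀ j ∈ PySem.List.pyRange (col + 1) (c + 1) 1,
      ((PySem.List.pyGet? (pvRowOf board row) j).getD none).isSome = true) →
    pvLetterOk ((PySem.List.pyGet? (pvRowOf board row) c).getD none) = true)

instance (board : List (List (Option (List (String × String))))) (row : Int) (col : Int) : Decidable (Pre_get_horizontal_word_py board row col) := by unfold Pre_get_horizontal_word_py; infer_instance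

def pvWitness_get_horizontal_word_py : (List (List (Option (List (String × String))))) × Int × Int :=
  ([[some [("letter", "A")], some [("letter", "B")], none, none, none, none, none, none, none, none, none, none, none, none, none]], 0, 0)

def Spec_get_horizontal_word_py (board : List (List (Option (List (String × String))))) (row : Int) (col : Int) (out : String) : Prop := out = get_horizontal_word_py_alt board row col
instance (board : List (List (Option (List (String × String))))) (row : Int) (col : Int) (out : String) : Decidable (Spec_get_horizontal_word_py board row col out) := by unfold Spec_get_horizontal_word_py; infer_instance

-- ===== CLAIM (what is proved, stated in full; the proofs are below) =====
def Claim_equal_get_horizontal_word_py : Prop := ∀ (board : List (List (Option (List (String × String))))) (row : Int) (col : Int), Dom_get_horizontal_word_py board row col → Pre_get_horizontal_word_py board row col → Spec_get_horizontal_word_py board row col (get_horizontal_word_py board row col)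

-- ===== LEMMAS AND PROOFS =====

-- the letter A's build pass contributes at index i ("" when the cell is None or out of range)
def pvLetterAt (r : List (Option (List (String × String)))) (i : Int) : String :=
  match PySem.List.pyGet? r i with
  | some (some cell) => pvLetter cell
  | _ => ""

lemma pvJoinNil (cs : List (List Char)) : PySem.Chars.join [] cs = cs.flatten := by
  induction cs with
  | nil => rfl
  | cons h t ih =>
    cases t with
    | nil => simp [PySem.Chars.join_singleton]
    | cons h2 t2 => rw [PySem.Chars.join_cons_cons]; simp_all

lemma pvFoldA (r : List (Option (List (String × String)))) :
    ∀ (l : List Int) (w : String),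
      (l.foldl (fun word c =>
        match PySem.List.pyGet? r c with
        | some (some cell) => word ++ pvLetter cell
        | _ => word) w).toList
      = w.toList ++ (l.map (fun i => (pvLetterAt r i).toList)).flatten := by
  intro l
  induction l with
  | nil => intro w; simp
  | cons i t ih =>
    intro w
    simp only [List.foldl_cons, List.map_cons, List.flatten_cons, ih]
    cases h : PySem.List.pyGet? r i with
    | none => simp [pvLetterAt, h]
    | some o =>
      cases o with
      | none => simp [pvLetterAt, h]
      | some cell => simp [pvLetterAt, h, List.append_assoc]

lemma pvScanLeft_facts (r : List (Option (List (String × String)))) (m : Int) :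
    pvScanLeft r m ≤ m ∧
    (∀ i, pvScanLeft r m ≤ i → i < m → pvFilled r i = true) ∧
    ¬(0 < pvScanLeft r m ∧ pvFilled r (pvScanLeft r m - 1) = true) ∧
    (pvScanLeft r m = m ∨ 0 ≤ pvScanLeft r m) := by
  fun_induction pvScanLeft r m with
  | case1 m h ih =>
    obtain ⟨ih1, ih2, ih3, ih4⟩ := ih
    refine ⟨by omega, ?_, ih3, by omega⟩
    intro i h1 h2
    by_cases hi : i < m - 1
    · exact ih2 i h1 hi
    · have : i = m - 1 := by omega
      rw [this]; exact h.2
  | case2 m h =>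
    exact ⟨le_refl _, by omega, h, Or.inl rfl⟩

lemma pvScanRight_facts (r : List (Option (List (String × String)))) (m : Int) :
    m ≤ pvScanRight r m ∧
    (∀ i, m < i → i ≤ pvScanRight r m → pvFilled r i = true) ∧
    ¬(pvScanRight r m < 14 ∧ pvFilled r (pvScanRight r m + 1) = true) ∧
    (pvScanRight r m = m ∨ pvScanRight r m ≤ 14) := by
  fun_induction pvScanRight r m with
  | case1 m h ih =>
    obtain ⟨ih1, ih2, ih3, ih4⟩ := ih
    refine ⟨by omega, ?_, ih3, by omega⟩
    intro i h1 h2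
    by_cases hi : m + 1 < i
    · exact ih2 i hi h2
    · have : i = m + 1 := by omega
      rw [this]; exact h.2
  | case2 m h =>
    exact ⟨le_refl _, by omega, h, Or.inl rfl⟩

lemma pvRun_right (r : List (Option (List (String × String)))) (col mx : Int)
    (hfill : ∀ i, col < i → i ≤ mx → pvFilled r i = true)
    (hstop : ¬(mx < 14 ∧ pvFilled r (mx + 1) = true))
    (hb : mx = col ∨ mx ≤ 14) :
    ∀ (fuel : Nat) (j : Int), col < j → j ≤ mx + 1 → (mx + 1 - j).toNat ≤ fuel →
      pvRun r (PySem.List.pyRange j 15 1) = (PySem.List.pyRange j (mx + 1) 1).map (pvLetterAt r) := by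
  intro fuel
  induction fuel with
  | zero =>
    intro j hj1 hj2 hj3
    have hje : j = mx + 1 := by omega
    rw [hje, PySem.List.pyRange_one_eq_nil (le_refl _), List.map_nil]
    by_cases h15 : (15 : Int) ≤ mx + 1
    · rw [PySem.List.pyRange_one_eq_nil h15]; rfl
    · rw [PySem.List.pyRange_one_cons (by omega : mx + 1 < 15)]
      have hnf : pvFilled r (mx + 1) ≠ true := fun hf => hstop ⟨by omega, hf⟩
      cases hg : PySem.List.pyGet? r (mx + 1) with
      | none => simp [pvRun, hg]
      | some o =>
        cases o with
        | none => simp [pvRun, hg]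
        | some cell => exact absurd (by simp [pvFilled, hg]) hnf
  | succ n ih =>
    intro j hj1 hj2 hj3
    by_cases hj : j ≤ mx
    · have hf : pvFilled r j = true := hfill j hj1 hj
      have hmx14 : mx ≤ 14 := by rcases hb with h | h <;> omega
      rw [PySem.List.pyRange_one_cons (show j < 15 by omega),
          PySem.List.pyRange_one_cons (show j < mx + 1 by omega)]
      cases hg : PySem.List.pyGet? r j with
      | none => simp [pvFilled, hg] at hf
      | some o =>
        cases o with
        | none => simp [pvFilled, hg] at hf
        | some cell =>
          simp only [pvRun, hg, List.map_cons]
          rw [ih (j + 1) (by omega) (by omega) (by omega)]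
          simp [pvLetterAt, hg]
    · have hje : j = mx + 1 := by omega
      rw [hje, PySem.List.pyRange_one_eq_nil (le_refl _), List.map_nil]
      by_cases h15 : (15 : Int) ≤ mx + 1
      · rw [PySem.List.pyRange_one_eq_nil h15]; rfl
      · rw [PySem.List.pyRange_one_cons (by omega : mx + 1 < 15)]
        have hnf : pvFilled r (mx + 1) ≠ true := fun hf => hstop ⟨by omega, hf⟩
        cases hg : PySem.List.pyGet? r (mx + 1) with
        | none => simp [pvRun, hg]
        | some o =>
          cases o with
          | none => simp [pvRun, hg]
          | some cell => exact absurd (by simp [pvFilled, hg]) hnf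

lemma pvRun_left (r : List (Option (List (String × String)))) (col mn : Int)
    (hfill : ∀ i, mn ≤ i → i < col → pvFilled r i = true)
    (hstop : ¬(0 < mn ∧ pvFilled r (mn - 1) = true))
    (hb : mn = col ∨ 0 ≤ mn) :
    ∀ (fuel : Nat) (j : Int), mn - 1 ≤ j → j < col → (j - (mn - 1)).toNat ≤ fuel →
      pvRun r (PySem.List.pyRange j (-1) (-1)) = (PySem.List.pyRange j (mn - 1) (-1)).map (pvLetterAt r) := by
  intro fuel
  induction fuel with
  | zero =>
    intro j hj1 hj2 hj3
    have hje : j = mn - 1 := by omega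
    rw [hje, PySem.List.pyRange_neg_one_eq_nil (le_refl _), List.map_nil]
    by_cases hneg : mn - 1 ≤ -1
    · rw [PySem.List.pyRange_neg_one_eq_nil hneg]; rfl
    · rw [PySem.List.pyRange_neg_one_cons (by omega : (-1 : Int) < mn - 1)]
      have hnf : pvFilled r (mn - 1) ≠ true := fun hf => hstop ⟨by omega, hf⟩
      cases hg : PySem.List.pyGet? r (mn - 1) with
      | none => simp [pvRun, hg]
      | some o =>
        cases o with
        | none => simp [pvRun, hg]
        | some cell => exact absurd (by simp [pvFilled, hg]) hnf
  | succ n ih =>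
    intro j hj1 hj2 hj3
    by_cases hj : mn ≤ j
    · have hf : pvFilled r j = true := hfill j hj hj2
      have h0 : 0 ≤ mn := by rcases hb with h | h <;> omega
      rw [PySem.List.pyRange_neg_one_cons (show (-1 : Int) < j by omega),
          PySem.List.pyRange_neg_one_cons (show mn - 1 < j by omega)]
      cases hg : PySem.List.pyGet? r j with
      | none => simp [pvFilled, hg] at hf
      | some o =>
        cases o with
        | none => simp [pvFilled, hg] at hf
        | some cell =>
          simp only [pvRun, hg, List.map_cons]
          rw [ih (j - 1) (by omega) (by omega) (by omega)]
          simp [pvLetterAt, hg]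
    · have hje : j = mn - 1 := by omega
      rw [hje, PySem.List.pyRange_neg_one_eq_nil (le_refl _), List.map_nil]
      by_cases hneg : mn - 1 ≤ -1
      · rw [PySem.List.pyRange_neg_one_eq_nil hneg]; rfl
      · rw [PySem.List.pyRange_neg_one_cons (by omega : (-1 : Int) < mn - 1)]
        have hnf : pvFilled r (mn - 1) ≠ true := fun hf => hstop ⟨by omega, hf⟩
        cases hg : PySem.List.pyGet? r (mn - 1) with
        | none => simp [pvRun, hg]
        | some o =>
          cases o with
          | none => simp [pvRun, hg]
          | some cell => exact absurd (by simp [pvFilled, hg]) hnf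

-- ===== VERDICT (by name: the statement is the Claim_ definition above) =====
theorem get_horizontal_word_py_spec : Claim_equal_get_horizontal_word_py := by
  intro board row col _ _
  unfold Spec_get_horizontal_word_py get_horizontal_word_py get_horizontal_word_py_alt
  dsimp only
  set r := pvRowOf board row with hr
  set mn := pvScanLeft r col with hmn
  set mx := pvScanRight r col with hmx
  obtain ⟨hL1, hL2, hL3, hL4⟩ := pvScanLeft_facts r col
  obtain ⟨hR1, hR2, hR3, hR4⟩ := pvScanRight_facts r col
  rw [← hmn] at hL1 hL2 hL3 hL4
  rw [← hmx] at hR1 hR2 hR3 hR4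
  apply String.toList_inj.mp
  rw [pvFoldA]
  rw [PySem.List.pyRange_one_append mn col (mx + 1) hL1 (by omega),
      PySem.List.pyRange_one_cons (show col < mx + 1 by omega)]
  rw [pvRun_left r col mn hL2 hL3 hL4 (col - 1 - (mn - 1)).toNat (col - 1) (by omega) (by omega) le_rfl]
  rw [pvRun_right r col mx hR2 hR3 hR4 (mx + 1 - (col + 1)).toNat (col + 1) (by omega) (by omega) le_rfl]
  rw [PySem.List.pyRange_neg_one_eq_reverse]
  have hcm : col - 1 + 1 = col := by omega
  have hmm : mn - 1 + 1 = mn := by omega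
  rw [hcm, hmm]
  rw [PySem.Str.toList_join]
  simp only [List.map_reverse, List.reverse_reverse, String.toList_empty]
  rw [pvJoinNil]
  simp only [List.map_append, List.flatten_append, List.nil_append, List.map_cons,
    List.flatten_cons]
  cases h : PySem.List.pyGet? r col with
  | none => simp [pvLetterAt, h, Function.comp_def]
  | some o =>
    cases o with
    | none => simp [pvLetterAt, h, Function.comp_def]
    | some cell => simp [pvLetterAt, h, Function.comp_def]
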